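-- pv_equiv track=rewrite | github.com/Naveen-Kumar-AA/SCL | PS1-qn3.py | REFtoRREF
-- ===== SOURCE A (Python) =====
-- def REFtoRREF(ref_mat,dime):
--     for i in range(dime[0]):
--         for j in range(dime[1]):
--             if(ref_mat[i][j] == 1):
--                 for m in range(i):
--                     mul_fac = ref_mat[m][j]
--                     for n in range(dime[1]):
--                         ref_mat[m][n] = ref_mat[m][n] - mul_fac*ref_mat[i][n]
--                 break
--     return ref_mat
-- ===== SOURCE B (Python) =====
-- def REFtoRREF(ref_mat, dime):
--     # Back-substitution oriented: because elimination in an REF matrix only ever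
--     # touches rows above a pivot, every pivot row equals the original row when it
--     # is used, so each output row can be computed independently from the original
--     # matrix: collect the pivot positions once, then rebuild each row by folding
--     # the eliminations of the pivots below it (top pivot first).
--     # Builds and returns a fresh matrix (return value only; no in-place mutation).
--     rows, cols = dime
--     pivots = []
--     for i in range(rows):
--         for j in range(cols):
--             if ref_mat[i][j] == 1:
--                 pivots.append((i, j))
--                 break
--     out = []
--     for m in range(len(ref_mat)):
--         row = list(ref_mat[m])
--         for i, j in pivots:
--             if i > m:
--                 f = row[j]
--                 row = [x - f * y for x, y in zip(row, ref_mat[i])]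
--         out.append(row)
--     return out
-- ===== Notes on version B (the rewrite author's own statement) =====
-- stated objective: alternative
-- what changed: Replaces A's pivot-major in-place elimination (each pivot mutates all rows above it) by a row-major back-substitution: pivot positions are collected once, then every output row is rebuilt independently from the ORIGINAL matrix by folding the eliminations of the pivots below it; Pre_ excludes inputs where A can raise IndexError (too few rows / rows shorter than dime[1]) and rows longer than dime[1], where A's leaving the surplus columns untouched is an accident of its column-bounded loop.
import Mathlib
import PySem

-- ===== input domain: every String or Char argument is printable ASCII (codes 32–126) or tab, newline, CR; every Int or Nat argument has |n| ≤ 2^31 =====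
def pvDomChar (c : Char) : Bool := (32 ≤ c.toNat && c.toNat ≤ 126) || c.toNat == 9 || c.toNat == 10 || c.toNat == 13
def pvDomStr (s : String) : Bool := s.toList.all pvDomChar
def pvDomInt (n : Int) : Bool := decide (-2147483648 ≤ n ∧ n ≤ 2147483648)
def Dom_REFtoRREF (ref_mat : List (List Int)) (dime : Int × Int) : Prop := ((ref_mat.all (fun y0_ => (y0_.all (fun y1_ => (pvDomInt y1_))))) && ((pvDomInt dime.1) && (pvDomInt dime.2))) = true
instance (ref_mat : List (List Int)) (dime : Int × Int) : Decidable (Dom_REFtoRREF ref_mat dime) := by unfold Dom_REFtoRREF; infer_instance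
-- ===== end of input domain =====

-- B replaces A's pivot-major in-place elimination by a row-major back-substitution:
-- it collects the pivot positions once, then rebuilds every output row independently
-- from the original matrix by folding the eliminations of the pivots below that row.
-- A mutates the caller's matrix in place, B builds a fresh one: the equivalence proved
-- here is about the RETURN value only.

-- ===== PORT A =====
-- for m in range(i): mul_fac = ref_mat[m][j]; for n in range(dime[1]): ref_mat[m][n] -= mul_fac*ref_mat[i][n]
def pvElimA (mat : List (List Int)) (i j cols : Int) : List (List Int) :=
  (PySem.List.pyRange 0 i 1).foldl (fun mat m =>
    let mul_fac := PySem.List.pyGetD (PySem.List.pyGetD mat m []) j 0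
    (PySem.List.pyRange 0 cols 1).foldl (fun mat n =>
      PySem.List.pySetD mat m (PySem.List.pySetD (PySem.List.pyGetD mat m []) n
        (PySem.List.pyGetD (PySem.List.pyGetD mat m []) n 0
          - mul_fac * PySem.List.pyGetD (PySem.List.pyGetD mat i []) n 0))) mat) mat

-- for j in range(dime[1]): if ref_mat[i][j] == 1: <eliminate above row i>; break
def pvScanA (mat : List (List Int)) (i cols : Int) : List Int → List (List Int)
  | [] => mat
  | j :: rest =>
    if PySem.List.pyGetD (PySem.List.pyGetD mat i []) j 0 == 1 then pvElimA mat i j cols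
    else pvScanA mat i cols rest

def REFtoRREF (ref_mat : List (List Int)) (dime : Int × Int) : List (List Int) :=
  (PySem.List.pyRange 0 dime.1 1).foldl
    (fun mat i => pvScanA mat i dime.2 (PySem.List.pyRange 0 dime.2 1)) ref_mat

-- ===== PORT B =====
-- for j in range(cols): if ref_mat[i][j] == 1: pivots.append((i, j)); break
def pvFindPivB (row : List Int) : List Int → Option Int
  | [] => none
  | j :: rest => if PySem.List.pyGetD row j 0 == 1 then some j else pvFindPivB row rest

def pvPivotsB (mat : List (List Int)) (rows cols : Int) : List (Int × Int) :=
  (PySem.List.pyRange 0 rows 1).foldl (fun acc i =>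
    match pvFindPivB (PySem.List.pyGetD mat i []) (PySem.List.pyRange 0 cols 1) with
    | some j => acc ++ [(i, j)]
    | none => acc) []

-- for i, j in pivots: if i > m: f = row[j]; row = [x - f*y for x, y in zip(row, ref_mat[i])]
def pvRowB (mat : List (List Int)) (pivots : List (Int × Int)) (m : Int) (row : List Int) : List Int :=
  pivots.foldl (fun row p =>
    if m < p.1 then
      let f := PySem.List.pyGetD row p.2 0
      (row.zip (PySem.List.pyGetD mat p.1 [])).map (fun q => q.1 - f * q.2)
    else row) row

def REFtoRREF_alt (ref_mat : List (List Int)) (dime : Int × Int) : List (List Int) :=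
  let pivots := pvPivotsB ref_mat dime.1 dime.2
  (PySem.List.pyRange 0 (ref_mat.length : Int) 1).map (fun m =>
    pvRowB ref_mat pivots m (PySem.List.pyGetD ref_mat m []))

-- ===== PRECONDITION & SPEC =====
-- When both dimensions are positive, Pre_ requires at least dime[0] rows and each of the
-- first dime[0] rows to have length exactly dime[1]: on shorter rows A can raise
-- IndexError, and on rows longer than dime[1] A's leaving the surplus columns untouched
-- is an accident of its column-bounded loop (see the cited example).
def Pre_REFtoRREF (ref_mat : List (List Int)) (dime : Int × Int) : Prop :=
  (0 < dime.1 ∧ 0 < dime.2) → (dime.1 ≤ (ref_mat.length : Int) ∧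
    ∀ row ∈ ref_mat.take dime.1.toNat, (row.length : Int) = dime.2)
instance (ref_mat : List (List Int)) (dime : Int × Int) : Decidable (Pre_REFtoRREF ref_mat dime) := by
  unfold Pre_REFtoRREF; infer_instance

def pvWitness_REFtoRREF : List (List Int) × (Int × Int) := ([[1, 2], [0, 1]], (2, 2))

def Spec_REFtoRREF (ref_mat : List (List Int)) (dime : Int × Int) (out : List (List Int)) : Prop := out = REFtoRREF_alt ref_mat dime
instance (ref_mat : List (List Int)) (dime : Int × Int) (out : List (List Int)) : Decidable (Spec_REFtoRREF ref_mat dime out) := by unfold Spec_REFtoRREF; infer_instance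

-- ===== CLAIM (what is proved, stated in full; the proofs are below) =====
def Claim_equal_REFtoRREF : Prop := ∀ (ref_mat : List (List Int)) (dime : Int × Int), Dom_REFtoRREF ref_mat dime → Pre_REFtoRREF ref_mat dime → Spec_REFtoRREF ref_mat dime (REFtoRREF ref_mat dime)

-- ===== LEMMAS AND PROOFS =====

-- Canonical Nat-indexed forms both ports are reduced to: cNewRow is one eliminated row,
-- cElim eliminates above pivot (i, j), cPiv is the pivot search of row i, cStep is A's
-- per-row step, cRowUpd is B's one back-substitution step on a single row.

def cNewRow (rM rI : List Int) (f : Int) (c : Nat) : List Int :=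
  (List.range c).map (fun n => rM.getD n 0 - f * rI.getD n 0) ++ rM.drop c

def cElim (mat : List (List Int)) (i j c : Nat) : List (List Int) :=
  (List.range i).foldl (fun mat' m =>
    mat'.set m (cNewRow (mat'.getD m []) (mat.getD i []) ((mat'.getD m []).getD j 0) c)) mat

def cPiv (mat : List (List Int)) (i c : Nat) : Option Nat :=
  (List.range c).find? (fun n => (mat.getD i []).getD n 0 == 1)

def cStep (c : Nat) (mat : List (List Int)) (i : Nat) : List (List Int) :=
  match cPiv mat i c with
  | some j => cElim mat i j c
  | none => mat

def cRowUpd (mat0 : List (List Int)) (c : Nat) (row : List Int) (p : Nat × Nat) : List Int :=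
  cNewRow row (mat0.getD p.1 []) (row.getD p.2 0) c

def cPivots (mat : List (List Int)) (R c : Nat) : List (Nat × Nat) :=
  (List.range R).filterMap (fun i => (cPiv mat i c).map (fun j => (i, j)))

theorem mgetD_set_ne (l : List (List Int)) (m n : Nat) (a : List Int) (h : m ≠ n) :
    (l.set m a).getD n [] = l.getD n [] := by
  simp [List.getD_eq_getElem?_getD, List.getElem?_set_ne h]

theorem mgetD_set_self (l : List (List Int)) (n : Nat) (a : List Int) (h : n < l.length) :
    (l.set n a).getD n [] = a := by
  simp [List.getD_eq_getElem?_getD, h]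

theorem set_getD_self (l : List (List Int)) (n : Nat) :
    l.set n (l.getD n []) = l := by
  by_cases h : n < l.length
  · apply List.ext_getElem?
    intro k
    by_cases hk : k = n
    · subst hk; simp [h, List.getD_eq_getElem?_getD]
    · simp [List.getElem?_set_ne (fun he => hk he.symm)]
  · rw [List.set_eq_of_length_le (by omega)]

theorem length_cNewRow (rM rI : List Int) (f : Int) (c : Nat) (h : c ≤ rM.length) :
    (cNewRow rM rI f c).length = rM.length := by
  simp [cNewRow]; omega

theorem cNewRow_getD_ge (rM rI : List Int) (f : Int) (c n : Nat) (h : c ≤ n) :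
    (cNewRow rM rI f c).getD n 0 = rM.getD n 0 := by
  simp only [cNewRow, List.getD_eq_getElem?_getD]
  rw [List.getElem?_append_right (by simp; omega)]
  simp only [List.length_map, List.length_range, List.getElem?_drop]
  have : c + (n - c) = n := by omega
  rw [this]

theorem cNewRow_set_succ (rM rI : List Int) (f : Int) (c : Nat) (h : c < rM.length) :
    (cNewRow rM rI f c).set c (rM.getD c 0 - f * rI.getD c 0) = cNewRow rM rI f (c + 1) := by
  simp only [cNewRow, List.range_succ, List.map_append, List.map_cons, List.map_nil]
  rw [List.set_append_right _ _ (by simp)]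
  simp only [List.length_map, List.length_range, Nat.sub_self]
  rw [List.drop_eq_getElem_cons h, List.set_cons_zero]
  simp [List.getD_eq_getElem?_getD, List.getElem?_eq_getElem h]

theorem foldl_set_length (l : List Nat) (F : List (List Int) → Nat → List Int) :
    ∀ (mat : List (List Int)),
      (l.foldl (fun mat m => mat.set m (F mat m)) mat).length = mat.length := by
  induction l with
  | nil => intro mat; rfl
  | cons x xs ih => intro mat; rw [List.foldl_cons, ih]; simp

theorem foldl_set_getD_ne (l : List Nat) (F : List (List Int) → Nat → List Int)
    (k : Nat) (hk : ∀ m ∈ l, m ≠ k) :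
    ∀ (mat : List (List Int)),
      (l.foldl (fun mat m => mat.set m (F mat m)) mat).getD k [] = mat.getD k [] := by
  induction l with
  | nil => intro mat; rfl
  | cons x xs ih =>
    intro mat
    rw [List.foldl_cons, ih (fun m hm => hk m (List.mem_cons_of_mem _ hm)),
      mgetD_set_ne _ _ _ _ (hk x (List.mem_cons_self))]

theorem innerFold_eq (m i : Nat) (f : Int) :
    ∀ (c : Nat) (mat : List (List Int)), m < mat.length → m ≠ i → c ≤ (mat.getD m []).length →
    (List.range c).foldl (fun mat n =>
        mat.set m ((mat.getD m []).set n
          ((mat.getD m []).getD n 0 - f * (mat.getD i []).getD n 0))) mat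
      = mat.set m (cNewRow (mat.getD m []) (mat.getD i []) f c) := by
  intro c
  induction c with
  | zero =>
    intro mat hm hmi hc
    have h0 : cNewRow (mat.getD m []) (mat.getD i []) f 0 = mat.getD m [] := by simp [cNewRow]
    rw [h0, set_getD_self]; rfl
  | succ c ih =>
    intro mat hm hmi hc
    rw [List.range_succ, List.foldl_append, ih mat hm hmi (by omega)]
    rw [List.foldl_cons, List.foldl_nil]
    rw [mgetD_set_self _ _ _ hm, mgetD_set_ne _ _ _ _ hmi,
      cNewRow_getD_ge _ _ _ _ _ (le_refl c),
      cNewRow_set_succ _ _ _ _ (by omega), List.set_set]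

theorem cElim_length (mat : List (List Int)) (i j c : Nat) :
    (cElim mat i j c).length = mat.length :=
  foldl_set_length _ _ mat

theorem cElim_getD_ge (mat : List (List Int)) (i j c k : Nat) (h : i ≤ k) :
    (cElim mat i j c).getD k [] = mat.getD k [] :=
  foldl_set_getD_ne _ _ k (fun m hm => by simp at hm; omega) mat

theorem cElim_getD_lt (mat : List (List Int)) (i j c t : Nat) (ht : t < i)
    (htl : t < mat.length) :
    (cElim mat i j c).getD t []
      = cNewRow (mat.getD t []) (mat.getD i []) ((mat.getD t []).getD j 0) c := by
  unfold cElim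
  have hsplit : List.range i
      = List.range t ++ t :: (List.range (i - t - 1)).map (fun k => (t + 1) + k) := by
    have h1 : i = (t + 1) + (i - t - 1) := by omega
    conv_lhs => rw [h1]
    rw [List.range_add, List.range_succ]
    simp
  rw [hsplit, List.foldl_append, List.foldl_cons]
  set P := (List.range t).foldl (fun mat' m =>
      mat'.set m (cNewRow (mat'.getD m []) (mat.getD i []) ((mat'.getD m []).getD j 0) c)) mat
    with hP
  have hPt : P.getD t [] = mat.getD t [] :=
    foldl_set_getD_ne _ _ t (fun m hm => by simp at hm; omega) mat
  have hPlen : P.length = mat.length := foldl_set_length _ _ mat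
  rw [foldl_set_getD_ne _ _ t
    (fun m hm => by rcases List.mem_map.mp hm with ⟨k, _, rfl⟩; omega),
    mgetD_set_self _ _ _ (by omega), hPt]

theorem cElim_partial_rowlen (mat0 : List (List Int)) (i j c : Nat)
    (hi : i ≤ mat0.length) (hc : ∀ m, m < i → c ≤ (mat0.getD m []).length) :
    ∀ k, k ≤ i → ∀ t,
      ((((List.range k)).foldl (fun mat' m =>
          mat'.set m (cNewRow (mat'.getD m []) (mat0.getD i []) ((mat'.getD m []).getD j 0) c)) mat0).getD t []).length
        = (mat0.getD t []).length := by
  intro k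
  induction k with
  | zero => intro _ t; rfl
  | succ k ih =>
    intro hk t
    rw [List.range_succ, List.foldl_append, List.foldl_cons, List.foldl_nil]
    set P := (List.range k).foldl (fun mat' m =>
        mat'.set m (cNewRow (mat'.getD m []) (mat0.getD i []) ((mat'.getD m []).getD j 0) c)) mat0 with hP
    have hPlen : P.length = mat0.length := foldl_set_length _ _ mat0
    by_cases ht : t = k
    · subst ht
      rw [mgetD_set_self _ _ _ (by omega)]
      rw [length_cNewRow _ _ _ _ (by rw [ih (by omega) t]; exact hc t (by omega))]
      exact ih (by omega) t
    · rw [mgetD_set_ne _ _ _ _ (fun he => ht he.symm)]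
      exact ih (by omega) t

theorem elimA_fold (mat0 : List (List Int)) (i j c : Nat)
    (hi : i ≤ mat0.length) (hc : ∀ m, m < i → c ≤ (mat0.getD m []).length) :
    ∀ k, k ≤ i →
    (List.range k).foldl (fun mat m =>
        (List.range c).foldl (fun macc n =>
          macc.set m ((macc.getD m []).set n
            ((macc.getD m []).getD n 0 - ((mat.getD m []).getD j 0) * (macc.getD i []).getD n 0))) mat) mat0
      = (List.range k).foldl (fun mat' m =>
          mat'.set m (cNewRow (mat'.getD m []) (mat0.getD i []) ((mat'.getD m []).getD j 0) c)) mat0 := by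
  intro k
  induction k with
  | zero => intro _; rfl
  | succ k ih =>
    intro hk
    rw [List.range_succ, List.foldl_append, List.foldl_append, ih (by omega)]
    rw [List.foldl_cons, List.foldl_nil, List.foldl_cons, List.foldl_nil]
    set P := (List.range k).foldl (fun mat' m =>
        mat'.set m (cNewRow (mat'.getD m []) (mat0.getD i []) ((mat'.getD m []).getD j 0) c)) mat0 with hP
    have hPlen : P.length = mat0.length := foldl_set_length _ _ mat0
    have hPi : P.getD i [] = mat0.getD i [] :=
      foldl_set_getD_ne _ _ i (fun m hm => by simp at hm; omega) mat0
    have hProw : ∀ t, ((P.getD t []).length) = (mat0.getD t []).length := by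
      intro t; exact cElim_partial_rowlen mat0 i j c hi hc k (by omega) t
    rw [innerFold_eq k i ((P.getD k []).getD j 0) c P (by omega) (by omega)
      (by rw [hProw k]; exact hc k (by omega)), hPi]

theorem elimA_eq_cElim (mat : List (List Int)) (i j c : Nat)
    (hi : i ≤ mat.length) (hc : ∀ m, m < i → c ≤ (mat.getD m []).length) :
    pvElimA mat ↑i ↑j ↑c = cElim mat i j c := by
  simp only [pvElimA, PySem.List.pyRange_zero_natCast, List.foldl_map,
    PySem.List.pyGetD_natCast, PySem.List.pySetD_natCast]
  exact elimA_fold mat i j c hi hc i (le_refl i)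

theorem scanA_eq (mat : List (List Int)) (i cols : Int) : ∀ (js : List Int),
    pvScanA mat i cols js
      = match js.find? (fun j => PySem.List.pyGetD (PySem.List.pyGetD mat i []) j 0 == 1) with
        | some j => pvElimA mat i j cols
        | none => mat := by
  intro js
  induction js with
  | nil => rfl
  | cons j rest ih =>
    by_cases hb : (PySem.List.pyGetD (PySem.List.pyGetD mat i []) j 0 == 1) = true
    · simp [pvScanA, hb]
    · simp only [Bool.not_eq_true] at hb
      simp [pvScanA, hb, ih]

theorem findPivB_eq (row : List Int) : ∀ (js : List Int),
    pvFindPivB row js = js.find? (fun j => PySem.List.pyGetD row j 0 == 1) := by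
  intro js
  induction js with
  | nil => rfl
  | cons j rest ih =>
    by_cases hb : (PySem.List.pyGetD row j 0 == 1) = true
    · simp [pvFindPivB, hb]
    · simp only [Bool.not_eq_true] at hb
      simp [pvFindPivB, hb, ih]

theorem pivotRow_eq (mat : List (List Int)) (i c : Nat) :
    pvFindPivB (PySem.List.pyGetD mat ↑i []) (PySem.List.pyRange 0 ↑c 1)
      = (cPiv mat i c).map (fun (j : Nat) => (j : Int)) := by
  rw [findPivB_eq]
  simp only [cPiv, PySem.List.pyRange_zero_natCast, List.find?_map,
    Function.comp_def, PySem.List.pyGetD_natCast]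

theorem scanA_pivot (mat : List (List Int)) (i c : Nat) :
    pvScanA mat ↑i ↑c (PySem.List.pyRange 0 ↑c 1)
      = match cPiv mat i c with
        | some j => pvElimA mat ↑i ↑j ↑c
        | none => mat := by
  rw [scanA_eq]
  have hx : (PySem.List.pyRange 0 (c : Int) 1).find?
      (fun j => PySem.List.pyGetD (PySem.List.pyGetD mat ↑i []) j 0 == 1)
      = (cPiv mat i c).map (fun (j : Nat) => (j : Int)) := by
    rw [← findPivB_eq]; exact pivotRow_eq mat i c
  rw [hx]
  cases cPiv mat i c <;> rfl

theorem main_fold (c : Nat) (mat0 : List (List Int)) :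
    ∀ (n lo : Nat) (mat : List (List Int)),
      (∀ k, lo ≤ k → mat.getD k [] = mat0.getD k []) →
      (List.range' lo n).foldl (cStep c) mat
        = ((List.range' lo n).filterMap (fun i => (cPiv mat0 i c).map (fun j => (i, j)))).foldl
            (fun mat p => cElim mat p.1 p.2 c) mat := by
  intro n
  induction n with
  | zero => intros; rfl
  | succ n ih =>
    intro lo mat hstab
    rw [List.range'_succ, List.foldl_cons, List.filterMap_cons]
    have hpiv : cPiv mat lo c = cPiv mat0 lo c := by
      unfold cPiv; rw [hstab lo (le_refl lo)]
    have hstep : cStep c mat lo = match cPiv mat0 lo c with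
        | some j => cElim mat lo j c | none => mat := by
      unfold cStep; rw [hpiv]
    cases h : cPiv mat0 lo c with
    | none =>
      rw [hstep, h]
      simp only [Option.map_none]
      exact ih (lo + 1) mat (fun k hk => hstab k (by omega))
    | some j =>
      rw [hstep, h]
      simp only [Option.map_some, List.foldl_cons]
      exact ih (lo + 1) (cElim mat lo j c) (fun k hk => by
        rw [cElim_getD_ge mat lo j c k (by omega)]; exact hstab k (by omega))

theorem foldl_pivots (mat : List (List Int)) (c : Nat) :
    ∀ (l : List Nat) (acc : List (Int × Int)),
      l.foldl (fun (acc : List (Int × Int)) (x : Nat) =>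
          match pvFindPivB (PySem.List.pyGetD mat ↑x []) (PySem.List.pyRange 0 ↑c 1) with
          | some j => acc ++ [((x : Int), j)]
          | none => acc) acc
        = acc ++ l.filterMap (fun (i : Nat) =>
            (cPiv mat i c).map (fun (j : Nat) => ((i : Int), (j : Int)))) := by
  intro l
  induction l with
  | nil => intro acc; simp
  | cons x xs ih =>
    intro acc
    rw [List.foldl_cons, List.filterMap_cons]
    have hx := pivotRow_eq mat x c
    cases h : cPiv mat x c with
    | none => rw [h, Option.map_none] at hx; rw [hx]; exact ih acc
    | some j =>
      rw [h, Option.map_some] at hx; rw [hx, ih]; simp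

theorem pivots_eq (mat : List (List Int)) (R c : Nat) :
    pvPivotsB mat ↑R ↑c
      = (cPivots mat R c).map (fun p => ((p.1 : Int), (p.2 : Int))) := by
  unfold pvPivotsB cPivots
  rw [PySem.List.pyRange_zero_natCast (n := R)]
  simp only [List.foldl_map]
  rw [foldl_pivots, List.nil_append, List.map_filterMap]
  apply List.filterMap_congr
  intro i _
  cases cPiv mat i c <;> simp

theorem cStep_length (c : Nat) (mat : List (List Int)) (i : Nat) :
    (cStep c mat i).length = mat.length := by
  unfold cStep
  cases h : cPiv mat i c with
  | none => rfl
  | some j => exact cElim_length mat i j c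

theorem cStep_rowlen (c : Nat) (mat : List (List Int)) (i : Nat) (hi : i ≤ mat.length)
    (hc : ∀ m, m < i → c ≤ (mat.getD m []).length) :
    ∀ t, ((cStep c mat i).getD t []).length = (mat.getD t []).length := by
  intro t
  unfold cStep
  cases h : cPiv mat i c with
  | none => rfl
  | some j => exact cElim_partial_rowlen mat i j c hi hc i (le_refl i) t

theorem cStepFold_inv (c : Nat) (mat0 : List (List Int)) (R : Nat) (hR : R ≤ mat0.length)
    (hrows : ∀ m, m < R → c ≤ (mat0.getD m []).length) :
    ∀ k, k ≤ R → ((List.range k).foldl (cStep c) mat0).length = mat0.length ∧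
      ∀ t, (((List.range k).foldl (cStep c) mat0).getD t []).length = (mat0.getD t []).length := by
  intro k
  induction k with
  | zero => exact fun _ => ⟨rfl, fun _ => rfl⟩
  | succ k ih =>
    intro hk
    obtain ⟨hlen, hrow⟩ := ih (by omega)
    rw [List.range_succ, List.foldl_append, List.foldl_cons, List.foldl_nil]
    set P := (List.range k).foldl (cStep c) mat0 with hP
    constructor
    · rw [cStep_length]; exact hlen
    · intro t
      rw [cStep_rowlen c P k (by omega)
        (fun m hm => by rw [hrow m]; exact hrows m (by omega)) t]
      exact hrow t

theorem portA_eq (c : Nat) (mat0 : List (List Int)) (R : Nat) (hR : R ≤ mat0.length)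
    (hrows : ∀ m, m < R → c ≤ (mat0.getD m []).length) :
    ∀ k, k ≤ R →
    (List.range k).foldl (fun (mat : List (List Int)) (x : Nat) =>
        pvScanA mat ↑x ↑c (PySem.List.pyRange 0 ↑c 1)) mat0
      = (List.range k).foldl (cStep c) mat0 := by
  intro k
  induction k with
  | zero => intro _; rfl
  | succ k ih =>
    intro hk
    rw [List.range_succ, List.foldl_append, List.foldl_append, ih (by omega),
      List.foldl_cons, List.foldl_nil, List.foldl_cons, List.foldl_nil]
    obtain ⟨hlen, hrow⟩ := cStepFold_inv c mat0 R hR hrows k (by omega)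
    set P := (List.range k).foldl (cStep c) mat0 with hP
    rw [scanA_pivot]
    cases h : cPiv P k c with
    | none => unfold cStep; rw [h]
    | some j =>
      unfold cStep; rw [h]
      exact elimA_eq_cElim P k j c (by omega)
        (fun m hm => by rw [hrow m]; exact hrows m (by omega))

-- the pivot list has strictly increasing row indices, all below R
theorem cPivots_mem (mat : List (List Int)) (R c : Nat) (p : Nat × Nat)
    (hp : p ∈ cPivots mat R c) : p.1 < R ∧ cPiv mat p.1 c = some p.2 := by
  unfold cPivots at hp
  rw [List.mem_filterMap] at hp
  obtain ⟨i, hi, hmap⟩ := hp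
  rw [List.mem_range] at hi
  cases h : cPiv mat i c with
  | none => rw [h] at hmap; simp at hmap
  | some j =>
    rw [h] at hmap
    simp only [Option.map_some, Option.some_inj] at hmap
    subst hmap
    exact ⟨hi, h⟩

theorem cPivots_pairwise (mat : List (List Int)) (R c : Nat) :
    (cPivots mat R c).Pairwise (fun p q => p.1 < q.1) := by
  unfold cPivots
  refine List.Pairwise.filterMap _ ?_ (List.pairwise_lt_range)
  intro a b hab p hp q hq
  cases ha : cPiv mat a c with
  | none => rw [ha] at hp; simp at hp
  | some j =>
    rw [ha] at hp
    cases hb : cPiv mat b c with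
    | none => rw [hb] at hq; simp at hq
    | some k =>
      rw [hb] at hq
      simp only [Option.map_some, Option.some_inj] at hp hq
      rw [← hp, ← hq]
      exact hab

-- the length of the pivot-major fold
theorem pivfold_length (c : Nat) :
    ∀ (L : List (Nat × Nat)) (mat : List (List Int)),
      (L.foldl (fun mat p => cElim mat p.1 p.2 c) mat).length = mat.length := by
  intro L
  induction L with
  | nil => intro mat; rfl
  | cons p rest ih => intro mat; rw [List.foldl_cons, ih, cElim_length]

-- row t of the pivot-major fold is the back-substitution fold of the pivots below t,
-- taken against the original matrix (pivot rows are never modified before use)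
theorem pivfold_getD (c : Nat) (mat0 : List (List Int)) :
    ∀ (L : List (Nat × Nat)) (mat : List (List Int)) (t : Nat),
      (∀ p ∈ L, p.1 < mat.length) →
      L.Pairwise (fun p q => p.1 < q.1) →
      (∀ p ∈ L, mat.getD p.1 [] = mat0.getD p.1 []) →
      t < mat.length →
      (L.foldl (fun mat p => cElim mat p.1 p.2 c) mat).getD t []
        = (L.filter (fun p => decide (t < p.1))).foldl (cRowUpd mat0 c) (mat.getD t []) := by
  intro L
  induction L with
  | nil => intro mat t _ _ _ _; rfl
  | cons p rest ih =>
    intro mat t hlt hpw hstab htl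
    rw [List.foldl_cons, List.filter_cons]
    have hplen : p.1 < mat.length := hlt p List.mem_cons_self
    have h1len : (cElim mat p.1 p.2 c).length = mat.length := cElim_length _ _ _ _
    have hrest : ∀ q ∈ rest, p.1 < q.1 := (List.pairwise_cons.mp hpw).1
    have hstab' : ∀ q ∈ rest, (cElim mat p.1 p.2 c).getD q.1 [] = mat0.getD q.1 [] := by
      intro q hq
      rw [cElim_getD_ge mat p.1 p.2 c q.1 (le_of_lt (hrest q hq))]
      exact hstab q (List.mem_cons_of_mem _ hq)
    have hIH := ih (cElim mat p.1 p.2 c) t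
      (fun q hq => by rw [h1len]; exact hlt q (List.mem_cons_of_mem _ hq))
      (List.pairwise_cons.mp hpw).2 hstab' (by omega)
    by_cases hc1 : t < p.1
    · simp only [hc1, decide_true, if_true]
      rw [hIH, List.foldl_cons]
      rw [cElim_getD_lt mat p.1 p.2 c t hc1 htl]
      unfold cRowUpd
      rw [hstab p List.mem_cons_self]
    · simp only [hc1, decide_false, Bool.false_eq_true, if_false]
      rw [hIH, cElim_getD_ge mat p.1 p.2 c t (by omega)]

-- B's zip-based row rebuild equals the canonical cNewRow when the rows have length c
theorem zip_eq_cNewRow (row rI : List Int) (f : Int) (c : Nat)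
    (h1 : row.length = c) (h2 : rI.length = c) :
    (row.zip rI).map (fun q => q.1 - f * q.2) = cNewRow row rI f c := by
  apply List.ext_getElem
  · simp [cNewRow, h1, h2]
  · intro n hn1 hn2
    simp only [List.length_map, List.length_zip, h1, h2, Nat.min_self] at hn1
    simp only [List.getElem_map, List.getElem_zip]
    unfold cNewRow
    rw [List.getElem_append_left (by simp [hn1])]
    simp [List.getD_eq_getElem?_getD, List.getElem?_eq_getElem (h1 ▸ hn1),
      List.getElem?_eq_getElem (h2 ▸ hn1)]

theorem cRowUpd_length (mat0 : List (List Int)) (c : Nat) (row : List Int) (p : Nat × Nat)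
    (h : row.length = c) : (cRowUpd mat0 c row p).length = c := by
  unfold cRowUpd
  rw [length_cNewRow _ _ _ _ (by omega)]; exact h

-- B's inner fold (zip form) equals the canonical back-substitution fold
theorem rowfold_zip (mat0 : List (List Int)) (c : Nat) :
    ∀ (L : List (Nat × Nat)) (row : List Int),
      row.length = c →
      (∀ p ∈ L, (mat0.getD p.1 []).length = c) →
      L.foldl (fun row p =>
          (row.zip (mat0.getD p.1 [])).map (fun q => q.1 - (row.getD p.2 0) * q.2)) row
        = L.foldl (cRowUpd mat0 c) row := by
  intro L
  induction L with
  | nil => intro row _ _; rfl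
  | cons p rest ih =>
    intro row hrow hL
    rw [List.foldl_cons, List.foldl_cons,
      zip_eq_cNewRow row _ _ c hrow (hL p List.mem_cons_self)]
    exact ih _ (cRowUpd_length mat0 c row p hrow)
      (fun q hq => hL q (List.mem_cons_of_mem _ hq))

-- B's port's per-row fold, reduced to the canonical filtered zip fold
theorem rowB_eq (mat : List (List Int)) (L : List (Nat × Nat)) (m : Nat) (row : List Int) :
    pvRowB mat (L.map (fun p => ((p.1 : Int), (p.2 : Int)))) ↑m row
      = (L.filter (fun p => decide (m < p.1))).foldl
          (fun row p => (row.zip (mat.getD p.1 [])).map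
            (fun q => q.1 - (row.getD p.2 0) * q.2)) row := by
  unfold pvRowB
  rw [List.foldl_map]
  simp only [PySem.List.pyGetD_natCast, Nat.cast_lt]
  rw [PySem.List.foldl_ite_eq_foldl_filter]

-- ===== VERDICT (by name: the statement is the Claim_ definition above) =====
theorem REFtoRREF_spec : Claim_equal_REFtoRREF := by
  intro ref_mat dime _hdom hpre
  unfold Spec_REFtoRREF
  unfold REFtoRREF REFtoRREF_alt
  by_cases hpos : 0 < dime.1 ∧ 0 < dime.2
  · obtain ⟨hr, hcpos⟩ := hpos
    obtain ⟨h1, h2⟩ := hpre ⟨hr, hcpos⟩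
    set R := dime.1.toNat with hRdef
    set c := dime.2.toNat with hcdef
    have hR : ((R : Int)) = dime.1 := by omega
    have hc : ((c : Int)) = dime.2 := by omega
    have hRlen : R ≤ ref_mat.length := by omega
    have hrowlen : ∀ m, m < R → (ref_mat.getD m []).length = c := by
      intro m hm
      have hmlen : m < ref_mat.length := by omega
      have hmem : ref_mat.getD m [] ∈ ref_mat.take R := by
        rw [List.getD_eq_getElem?_getD, List.getElem?_eq_getElem hmlen]
        simp only [Option.getD_some]
        have heq : ref_mat[m] = (ref_mat.take R)[m]'(by rw [List.length_take]; omega) := by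
          rw [List.getElem_take]
        rw [heq]
        exact List.getElem_mem _
      have := h2 _ hmem
      omega
    rw [← hR, ← hc]
    -- A side to the canonical pivot-major fold
    rw [PySem.List.pyRange_zero_natCast (n := R)]
    simp only [List.foldl_map]
    rw [portA_eq c ref_mat R hRlen (fun m hm => le_of_eq (hrowlen m hm).symm) R (le_refl R)]
    rw [List.range_eq_range', main_fold c ref_mat R 0 ref_mat (fun k _ => rfl),
      ← List.range_eq_range']
    have hLdef : (List.range R).filterMap (fun i => (cPiv ref_mat i c).map (fun j => (i, j)))
        = cPivots ref_mat R c := rfl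
    rw [hLdef]
    set L := cPivots ref_mat R c with hLset
    have hmemL : ∀ p ∈ L, p.1 < R ∧ cPiv ref_mat p.1 c = some p.2 := by
      intro p hp; exact cPivots_mem ref_mat R c p (hLset ▸ hp)
    -- B side to per-row folds
    rw [pivots_eq ref_mat R c, ← hLset,
      PySem.List.pyRange_zero_natCast (n := ref_mat.length), List.map_map]
    apply List.ext_getElem
    · rw [pivfold_length]; simp
    · intro t ht1 ht2
      have htlen : t < ref_mat.length := by
        rw [pivfold_length] at ht1; exact ht1
      simp only [List.getElem_map, List.getElem_range, Function.comp_apply]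
      rw [PySem.List.pyGetD_natCast, rowB_eq]
      have hgd : (List.foldl (fun mat p => cElim mat p.1 p.2 c) ref_mat L)[t]'ht1
          = (List.foldl (fun mat p => cElim mat p.1 p.2 c) ref_mat L).getD t [] :=
        (List.getD_eq_getElem _ _ ht1).symm
      rw [hgd]
      rw [pivfold_getD c ref_mat L ref_mat t
        (fun p hp => lt_of_lt_of_le (hmemL p hp).1 hRlen)
        (hLset ▸ cPivots_pairwise ref_mat R c)
        (fun p _ => rfl) htlen]
      by_cases htR : t < R
      · rw [← rowfold_zip ref_mat c (L.filter (fun p => decide (t < p.1)))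
          (ref_mat.getD t []) (hrowlen t htR)
          (fun p hp => hrowlen p.1 (hmemL p (List.mem_of_mem_filter hp)).1)]
      · have hfil : L.filter (fun p => decide (t < p.1)) = [] := by
          rw [List.filter_eq_nil_iff]
          intro p hp
          have := (hmemL p hp).1
          simp only [decide_eq_true_eq]
          omega
        rw [hfil]
        rfl
  · -- a non-positive dimension: there are no pivots and both sides return the matrix
    have hdeg := not_and_or.mp hpos
    have hpiv : pvPivotsB ref_mat dime.1 dime.2 = [] := by
      unfold pvPivotsB
      rcases hdeg with h | h
      · rw [PySem.List.pyRange_one_eq_nil (b := dime.1) (by omega)]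
        rfl
      · rw [PySem.List.pyRange_one_eq_nil (b := dime.2) (by omega)]
        simp only [pvFindPivB]
        exact PySem.List.foldl_ignore _ _
    have hA : (PySem.List.pyRange 0 dime.1 1).foldl
        (fun mat i => pvScanA mat i dime.2 (PySem.List.pyRange 0 dime.2 1)) ref_mat
        = ref_mat := by
      rcases hdeg with h | h
      · rw [PySem.List.pyRange_one_eq_nil (b := dime.1) (by omega)]
        rfl
      · rw [PySem.List.pyRange_one_eq_nil (b := dime.2) (by omega)]
        simp only [pvScanA]
        exact PySem.List.foldl_ignore _ _
    rw [hA, hpiv]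
    simp only [pvRowB, List.foldl_nil]
    rw [PySem.List.map_pyGetD_pyRange_zero']
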